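-- pv_equiv track=rewrite | github.com/semicontinuity/datatools | datatools/jt/llmcodec/string_utils.py | tokenize_normal
-- ===== SOURCE A (Python) =====
-- def tokenize_normal(text: str) -> list[str]:
--     tokens = []
--     i = 0
--     n = len(text)
--     while i < n:
--         is_alnum = _is_alnum(text[i])
--         j = i + 1
--         while j < n and _is_alnum(text[j]) == is_alnum:
--             j += 1
--         tokens.append(text[i:j])
--         i = j
--     return tokens
--
-- def _is_alnum(c: str) -> bool:
--     return c.isalnum() or c == "_"
-- ===== SOURCE B (Python) =====
-- def tokenize_normal(text: str) -> list[str]: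
--     tokens = []
--     cur = []
--     prev = None
--     for c in text:
--         k = _is_alnum(c)
--         if k != prev and cur:
--             tokens.append(''.join(cur))
--             cur = []
--         cur.append(c)
--         prev = k
--     if cur:
--         tokens.append(''.join(cur))
--     return tokens
--
-- def _is_alnum(c: str) -> bool:
--     return c.isalnum() or c == "_"
-- ===== Notes on version B (the rewrite author's own statement) =====
-- stated objective: simpler
-- what changed: Replaced the index/run-boundary bookkeeping (outer while with an inner run-scanning while and slicing) by a single fold over the characters that maintains the current run and the previous character class, flushing the run when the class changes.
import Mathlib
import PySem

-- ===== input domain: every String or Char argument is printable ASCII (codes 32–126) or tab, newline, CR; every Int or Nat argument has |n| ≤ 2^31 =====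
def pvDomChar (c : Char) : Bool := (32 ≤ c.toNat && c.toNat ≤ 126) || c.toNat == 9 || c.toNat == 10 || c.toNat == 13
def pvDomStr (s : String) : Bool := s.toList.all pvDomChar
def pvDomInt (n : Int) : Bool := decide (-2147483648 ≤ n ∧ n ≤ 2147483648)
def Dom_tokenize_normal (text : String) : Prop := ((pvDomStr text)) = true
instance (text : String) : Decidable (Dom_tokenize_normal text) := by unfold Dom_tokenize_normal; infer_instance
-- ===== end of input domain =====

-- B replaces A's index/run-boundary bookkeeping (inner while scan + slicing) by a
-- single fold over the characters maintaining the current run and previous class (simpler).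


-- shared translation of _is_alnum (an identical helper in both Pythons)
def pyIsAlnumU (c : Char) : Bool := PySem.Chars.isalnum c || (c == '_')

-- ===== PORT A =====
-- inner 'while j < n and _is_alnum(text[j]) == is_alnum: j += 1'
def tokA_inner (cs : List Char) (isAl : Bool) (j : Nat) : Nat :=
  if h : j < cs.length then
    if pyIsAlnumU cs[j] == isAl then tokA_inner cs isAl (j + 1) else j
  else j
termination_by cs.length - j

theorem tokA_inner_le (cs : List Char) (isAl : Bool) (j : Nat) : j ≤ tokA_inner cs isAl j := by
  unfold tokA_inner
  split
  · split
    · exact Nat.le_trans (Nat.le_succ j) (tokA_inner_le cs isAl (j + 1))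
    · exact Nat.le_refl j
  · exact Nat.le_refl j
termination_by cs.length - j

-- outer 'while i < n: … tokens.append(text[i:j]); i = j'
def tokA_outer (cs : List Char) (i : Nat) (tokens : List String) : List String :=
  if h : i < cs.length then
    let isAl := pyIsAlnumU cs[i]
    let j := tokA_inner cs isAl (i + 1)
    tokA_outer cs j (tokens ++ [String.ofList (PySem.List.slice cs (some (i : Int)) (some (j : Int)))])
  else tokens
termination_by cs.length - i
decreasing_by
  have := tokA_inner_le cs (pyIsAlnumU cs[i]) (i + 1)
  omega

def tokenize_normal (text : String) : List String := tokA_outer text.toList 0 []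

-- ===== PORT B =====
-- one step of Source B's 'for c in text' loop; state = (tokens, cur, prev)
def tokB_step (st : List String × List Char × Option Bool) (c : Char) :
    List String × List Char × Option Bool :=
  let k := pyIsAlnumU c
  let st' := if some k ≠ st.2.2 ∧ st.2.1 ≠ [] then (st.1 ++ [String.ofList st.2.1], ([] : List Char)) else (st.1, st.2.1)
  (st'.1, st'.2 ++ [c], some k)

-- trailing 'if cur: tokens.append(''.join(cur))'
def tokB_fin (st : List String × List Char × Option Bool) : List String :=
  if st.2.1 ≠ [] then st.1 ++ [String.ofList st.2.1] else st.1

def tokenize_normal_alt (text : String) : List String :=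
  tokB_fin (text.toList.foldl tokB_step ([], [], none))

-- ===== PRECONDITION & SPEC =====
def Spec_tokenize_normal (text : String) (out : List String) : Prop := out = tokenize_normal_alt text
instance (text : String) (out : List String) : Decidable (Spec_tokenize_normal text out) := by unfold Spec_tokenize_normal; infer_instance

-- ===== CLAIM (what is proved, stated in full; the proofs are below) =====
def Claim_equal_tokenize_normal : Prop := ∀ (text : String), Dom_tokenize_normal text → Spec_tokenize_normal text (tokenize_normal text)

-- ===== LEMMAS AND PROOFS =====

-- ghost characterisation: the maximal runs of equal pyIsAlnumU-class
def pvRuns : List Char → List (List Char)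
  | [] => []
  | c :: rest =>
      (c :: rest.takeWhile (fun d => pyIsAlnumU d == pyIsAlnumU c)) ::
        pvRuns (rest.dropWhile (fun d => pyIsAlnumU d == pyIsAlnumU c))
termination_by cs => cs.length
decreasing_by
  exact Nat.lt_succ_of_le (List.length_dropWhile_le _ rest)

theorem tokA_inner_spec (cs : List Char) (isAl : Bool) (j : Nat) :
    tokA_inner cs isAl j = j + ((cs.drop j).takeWhile (fun d => pyIsAlnumU d == isAl)).length := by
  unfold tokA_inner
  split
  · rename_i h
    have hcons : cs.drop j = cs[j] :: cs.drop (j + 1) := List.drop_eq_getElem_cons h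
    split
    · rename_i hp
      have ht : (cs.drop j).takeWhile (fun d => pyIsAlnumU d == isAl)
          = cs[j] :: (cs.drop (j + 1)).takeWhile (fun d => pyIsAlnumU d == isAl) := by
        rw [hcons, List.takeWhile_cons]
        simp [hp]
      rw [tokA_inner_spec cs isAl (j + 1), ht]
      simp
      omega
    · rename_i hp
      have ht : (cs.drop j).takeWhile (fun d => pyIsAlnumU d == isAl) = [] := by
        rw [hcons, List.takeWhile_cons]
        simp [hp]
      rw [ht]
      simp
  · rename_i h
    rw [List.drop_eq_nil_of_le (by omega)]
    simp
termination_by cs.length - j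

theorem tokA_outer_spec (cs : List Char) (i : Nat) (tokens : List String) :
    tokA_outer cs i tokens = tokens ++ (pvRuns (cs.drop i)).map String.ofList := by
  unfold tokA_outer
  split
  · rename_i h
    have hj := tokA_inner_spec cs (pyIsAlnumU cs[i]) (i + 1)
    set p : Char → Bool := fun d => pyIsAlnumU d == pyIsAlnumU cs[i] with hp
    set t : List Char := (cs.drop (i + 1)).takeWhile p with ht
    have hdrop : cs.drop i = cs[i] :: cs.drop (i + 1) := List.drop_eq_getElem_cons h
    have hsplit : cs.drop (i + 1) = t ++ (cs.drop (i + 1)).dropWhile p :=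
      (List.takeWhile_append_dropWhile).symm
    have hslice : PySem.List.slice cs (some (i : Int)) (some ((tokA_inner cs (pyIsAlnumU cs[i]) (i+1) : Nat) : Int))
        = cs[i] :: t := by
      rw [PySem.List.slice_toNat cs (Int.natCast_nonneg i) (Int.natCast_nonneg _)]
      simp only [Int.toNat_natCast]
      rw [hj, hdrop]
      have he : i + 1 + t.length - i = t.length + 1 := by omega
      rw [he, List.take_succ_cons]
      congr 1
      calc (cs.drop (i + 1)).take t.length
           = (t ++ (cs.drop (i + 1)).dropWhile p).take t.length := by rw [← hsplit]
        _  = t := by simp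
    have hdropj : cs.drop (tokA_inner cs (pyIsAlnumU cs[i]) (i+1)) = (cs.drop (i + 1)).dropWhile p := by
      rw [hj, ← List.drop_drop]
      conv_lhs => rw [hsplit]
      exact List.drop_left
    rw [tokA_outer_spec cs _ _]
    rw [hslice, hdropj, hdrop, pvRuns]
    simp
    exact ⟨by rw [ht, hp], by rw [hp]⟩
  · rename_i h
    rw [List.drop_eq_nil_of_le (by omega)]
    simp [pvRuns]
termination_by cs.length - i
decreasing_by
  have := tokA_inner_le cs (pyIsAlnumU cs[i]) (i + 1)
  omega

theorem tokB_fold_spec (cs : List Char) (tokens : List String) (cur : List Char) (k : Bool)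
    (hcur : cur ≠ []) :
    tokB_fin (cs.foldl tokB_step (tokens, cur, some k)) =
      tokens ++ String.ofList (cur ++ cs.takeWhile (fun d => pyIsAlnumU d == k)) ::
        (pvRuns (cs.dropWhile (fun d => pyIsAlnumU d == k))).map String.ofList := by
  induction cs generalizing tokens cur k with
  | nil => simp [tokB_fin, hcur, pvRuns]
  | cons c rest ih =>
    by_cases hc : pyIsAlnumU c = k
    · have hstep : tokB_step (tokens, cur, some k) c = (tokens, cur ++ [c], some k) := by
        simp [tokB_step, hc]
      rw [List.foldl_cons, hstep, ih tokens (cur ++ [c]) k (by simp)]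
      simp [hc]
    · have hstep : tokB_step (tokens, cur, some k) c = (tokens ++ [String.ofList cur], [c], some (pyIsAlnumU c)) := by
        simp [tokB_step, hc, hcur]
      rw [List.foldl_cons, hstep, ih _ [c] (pyIsAlnumU c) (by simp)]
      simp [hc, pvRuns]

-- ===== VERDICT (by name: the statement is the Claim_ definition above) =====
theorem tokenize_normal_spec : Claim_equal_tokenize_normal := by
  intro text _
  unfold Spec_tokenize_normal tokenize_normal tokenize_normal_alt
  rw [tokA_outer_spec]
  cases hcs : text.toList with
  | nil => simp [tokB_fin, pvRuns]
  | cons c rest =>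
    have hstep : tokB_step (([] : List String), ([] : List Char), (none : Option Bool)) c
        = ([], [c], some (pyIsAlnumU c)) := by
      simp [tokB_step]
    rw [List.foldl_cons, hstep, tokB_fold_spec rest [] [c] (pyIsAlnumU c) (by simp)]
    simp [pvRuns]
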